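-- pv_equiv track=rewrite | github.com/Lucky-Nicky/test-ai | frontend/views/test_plan.py | execute_plan_body
-- ===== SOURCE A (Python) =====
-- def execute_plan_body(rows):
--     body_html = ''
--     case, gc, smoke, first, second, hg, hgun = '不涉及', '不涉及', '不涉及', '不涉及', '不涉及', '不涉及', '不涉及'
--     case_remark, gc_remark, smoke_remark, first_remark, second_remark, hg_remark, hgun_remark = '', '', '', '', '', '', ''
--     for row in rows:
--         if row['testStage'] == '用例编写':
--             case = row['time'] if 'time' in row and row['time']else '不涉及'
--             case_remark = row['remark'] if 'remark' in row and row['remark'] else ''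
--         if row['testStage'] == '跟测':
--             gc = row['time'] if 'time' in row and row['time'] else '不涉及'
--             gc_remark = row['remark'] if 'remark' in row and row['remark'] else ''
--         if row['testStage'] == '冒烟测试':
--             smoke = row['time'] if 'time' in row and row['time'] else '不涉及'
--             smoke_remark = row['remark'] if 'remark' in row and row['remark'] else ''
--         if row['testStage'] == '第一轮系统测试':
--             first = row['time'] if 'time' in row and row['time'] else '不涉及'
--             first_remark = row['remark'] if 'remark' in row and row['remark'] else ''
--         if row['testStage'] == '第二轮系统测试':
--             second = row['time'] if 'time' in row and row['time'] else '不涉及'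
--             second_remark = row['remark'] if 'remark' in row and row['remark'] else ''
--         if row['testStage'] == '回归测试':
--             hg = row['time'] if 'time' in row and row['time'] else '不涉及'
--             hg_remark = row['remark'] if 'remark' in row and row['remark'] else ''
--         if row['testStage'] == '回滚验证':
--             hgun = row['time'] if 'time' in row and row['time'] else '不涉及'
--             hgun_remark = row['remark'] if 'remark' in row and row['remark'] else ''
--     body_html += f"""
--     <tr>
--         <td><b>用例编写</b></td>
--         <td>{case}</td>
--         <td>{case_remark}</td>
--     </tr>
--     <tr>
--         <td><b>跟测\接口测试</b></td>
--         <td>{gc}</td>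
--         <td>{gc_remark}</td>
--     </tr>
--     <tr>
--         <td colspan="3">
--         -------------------------------------------------提测------------------------------------------
--         </td>
--     </tr>
--     <tr>
--         <td><b>冒烟测试</b></td>
--         <td>{smoke}</td>
--         <td>{smoke_remark}</td>
--     </tr>
--     <tr>
--         <td><b>第一轮系统测试</b></td>
--         <td>{first}</td>
--         <td>{first_remark}</td>
--     </tr>
--     <tr>
--         <td><b>缺陷创建与跟踪</b></td>
--         <td>-</td>
--         <td>此项无法评估，固定填-</td>
--     </tr>
--         <tr>
--         <td><b>第二轮系统测试</b></td>
--         <td>{second}</td>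
--         <td>{second_remark}</td>
--     </tr>
--     <tr>
--         <td colspan="3">
--         -------------------------------------------------预封板-----------------------------------------
--         </td>
--     </tr>
--     <tr>
--         <td><b>回归测试</b></td>
--         <td>{hg}</td>
--         <td>{hg_remark}</td>
--     </tr>
--     <tr>
--         <td colspan="3">
--         --------------------------------------------------封板-----------------------------------------
--         </td>
--     </tr>
--         <tr>
--         <td><b>回滚</b></td>
--         <td>{hgun}</td>
--         <td>{hgun_remark}</td>
--     </tr> \n
--     """
--
--     return body_html
-- ===== SOURCE B (Python) =====
-- def execute_plan_body(rows):
--     def cells(stage):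
--         # last matching row wins: scan backwards, take the first match
--         for row in reversed(rows):
--             if row['testStage'] == stage:
--                 return (row.get('time') or '不涉及', row.get('remark') or '')
--         return ('不涉及', '')
--
--     case, case_remark = cells('用例编写')
--     follow, follow_remark = cells('跟测')
--     smoke, smoke_remark = cells('冒烟测试')
--     first, first_remark = cells('第一轮系统测试')
--     second, second_remark = cells('第二轮系统测试')
--     hg, hg_remark = cells('回归测试')
--     hgun, hgun_remark = cells('回滚验证')
--
--     return f"""
--     <tr>
--         <td><b>用例编写</b></td>
--         <td>{case}</td>
--         <td>{case_remark}</td>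
--     </tr>
--     <tr>
--         <td><b>跟测\\接口测试</b></td>
--         <td>{follow}</td>
--         <td>{follow_remark}</td>
--     </tr>
--     <tr>
--         <td colspan="3">
--         -------------------------------------------------提测------------------------------------------
--         </td>
--     </tr>
--     <tr>
--         <td><b>冒烟测试</b></td>
--         <td>{smoke}</td>
--         <td>{smoke_remark}</td>
--     </tr>
--     <tr>
--         <td><b>第一轮系统测试</b></td>
--         <td>{first}</td>
--         <td>{first_remark}</td>
--     </tr>
--     <tr>
--         <td><b>缺陷创建与跟踪</b></td>
--         <td>-</td>
--         <td>此项无法评估，固定填-</td>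
--     </tr>
--         <tr>
--         <td><b>第二轮系统测试</b></td>
--         <td>{second}</td>
--         <td>{second_remark}</td>
--     </tr>
--     <tr>
--         <td colspan="3">
--         -------------------------------------------------预封板-----------------------------------------
--         </td>
--     </tr>
--     <tr>
--         <td><b>回归测试</b></td>
--         <td>{hg}</td>
--         <td>{hg_remark}</td>
--     </tr>
--     <tr>
--         <td colspan="3">
--         --------------------------------------------------封板-----------------------------------------
--         </td>
--     </tr>
--         <tr>
--         <td><b>回滚</b></td>
--         <td>{hgun}</td>
--         <td>{hgun_remark}</td>
--     </tr> \n
--     """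
-- ===== Notes on version B (the rewrite author's own statement) =====
-- stated objective: alternative
-- what changed: Replaces A's single forward pass over 14 scalar accumulators with seven independent backward scans (reversed(rows), first match = last occurrence) that fetch each stage's (time, remark) pair on demand; trades one stateful pass for seven stateless searches.
import Mathlib
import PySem

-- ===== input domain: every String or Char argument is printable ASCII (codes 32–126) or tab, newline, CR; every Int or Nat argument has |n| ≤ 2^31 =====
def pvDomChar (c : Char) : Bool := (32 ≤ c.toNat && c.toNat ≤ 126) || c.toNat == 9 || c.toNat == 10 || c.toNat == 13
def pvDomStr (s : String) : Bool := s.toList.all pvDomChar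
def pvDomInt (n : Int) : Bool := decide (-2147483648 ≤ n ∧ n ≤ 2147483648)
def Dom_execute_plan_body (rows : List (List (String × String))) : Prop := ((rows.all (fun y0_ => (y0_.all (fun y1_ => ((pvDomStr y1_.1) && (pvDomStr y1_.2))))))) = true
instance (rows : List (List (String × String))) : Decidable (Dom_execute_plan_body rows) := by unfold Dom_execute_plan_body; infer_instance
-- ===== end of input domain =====

-- B replaces A's single forward pass over 14 scalar accumulators by seven backward scans
-- (last matching row per stage); same output, an alternative decomposition.

-- shared helpers: the per-row cell expressions (identical expressions in both Pythons) and the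
-- constant pieces of the f-string template (identical literal in both Pythons)
def pvCellTime (row : List (String × String)) : String :=
  match (PySem.Dict.mk row).get? "time" with
  | some v => if v = "" then "不涉及" else v
  | none => "不涉及"

def pvCellRemark (row : List (String × String)) : String :=
  match (PySem.Dict.mk row).get? "remark" with
  | some v => if v = "" then "" else v
  | none => ""

-- row['testStage'] == stage (Pre_ guarantees the key is present; '.getD ""' is a stand-in)
def pvIsStage (s : String) (row : List (String × String)) : Bool :=
  ((PySem.Dict.mk row).get? "testStage").getD "" == s

def pvTpl0 : String := "\n    <tr>\n        <td><b>用例编写</b></td>\n        <td>"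
def pvTpl1 : String := "</td>\n        <td>"
def pvTpl2 : String := "</td>\n    </tr>\n    <tr>\n        <td><b>跟测\\接口测试</b></td>\n        <td>"
def pvTpl4 : String := "</td>\n    </tr>\n    <tr>\n        <td colspan=\"3\">\n        -------------------------------------------------提测------------------------------------------\n        </td>\n    </tr>\n    <tr>\n        <td><b>冒烟测试</b></td>\n        <td>"
def pvTpl6 : String := "</td>\n    </tr>\n    <tr>\n        <td><b>第一轮系统测试</b></td>\n        <td>"
def pvTpl8 : String := "</td>\n    </tr>\n    <tr>\n        <td><b>缺陷创建与跟踪</b></td>\n        <td>-</td>\n        <td>此项无法评估，固定填-</td>\n    </tr>\n        <tr>\n        <td><b>第二轮系统测试</b></td>\n        <td>"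
def pvTpl10 : String := "</td>\n    </tr>\n    <tr>\n        <td colspan=\"3\">\n        -------------------------------------------------预封板-----------------------------------------\n        </td>\n    </tr>\n    <tr>\n        <td><b>回归测试</b></td>\n        <td>"
def pvTpl12 : String := "</td>\n    </tr>\n    <tr>\n        <td colspan=\"3\">\n        --------------------------------------------------封板-----------------------------------------\n        </td>\n    </tr>\n        <tr>\n        <td><b>回滚</b></td>\n        <td>"
def pvTpl14 : String := "</td>\n    </tr> \n\n    "

def pvRender (case caseR gc gcR smoke smokeR first firstR second secondR hg hgR hgun hgunR : String) : String :=
  pvTpl0 ++ case ++ pvTpl1 ++ caseR ++ pvTpl2 ++ gc ++ pvTpl1 ++ gcR ++ pvTpl4 ++ smoke ++ pvTpl1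
    ++ smokeR ++ pvTpl6 ++ first ++ pvTpl1 ++ firstR ++ pvTpl8 ++ second ++ pvTpl1 ++ secondR
    ++ pvTpl10 ++ hg ++ pvTpl1 ++ hgR ++ pvTpl12 ++ hgun ++ pvTpl1 ++ hgunR ++ pvTpl14

-- ===== PORT A =====
-- A's loop state: the fourteen scalar variables
structure StA where
  tCase : String
  tGc : String
  tSmoke : String
  tFirst : String
  tSecond : String
  tHg : String
  tHgun : String
  rCase : String
  rGc : String
  rSmoke : String
  rFirst : String
  rSecond : String
  rHg : String
  rHgun : String
deriving Repr, DecidableEq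

-- one iteration of A's loop: seven ifs on row['testStage'], each guarding its pair of variables
def pvStepA (st : StA) (row : List (String × String)) : StA :=
  { tCase := if pvIsStage "用例编写" row then pvCellTime row else st.tCase,
    rCase := if pvIsStage "用例编写" row then pvCellRemark row else st.rCase,
    tGc := if pvIsStage "跟测" row then pvCellTime row else st.tGc,
    rGc := if pvIsStage "跟测" row then pvCellRemark row else st.rGc,
    tSmoke := if pvIsStage "冒烟测试" row then pvCellTime row else st.tSmoke,
    rSmoke := if pvIsStage "冒烟测试" row then pvCellRemark row else st.rSmoke,
    tFirst := if pvIsStage "第一轮系统测试" row then pvCellTime row else st.tFirst,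
    rFirst := if pvIsStage "第一轮系统测试" row then pvCellRemark row else st.rFirst,
    tSecond := if pvIsStage "第二轮系统测试" row then pvCellTime row else st.tSecond,
    rSecond := if pvIsStage "第二轮系统测试" row then pvCellRemark row else st.rSecond,
    tHg := if pvIsStage "回归测试" row then pvCellTime row else st.tHg,
    rHg := if pvIsStage "回归测试" row then pvCellRemark row else st.rHg,
    tHgun := if pvIsStage "回滚验证" row then pvCellTime row else st.tHgun,
    rHgun := if pvIsStage "回滚验证" row then pvCellRemark row else st.rHgun }

def execute_plan_body (rows : List (List (String × String))) : String :=
  let st := rows.foldl pvStepA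
    ⟨"不涉及", "不涉及", "不涉及", "不涉及", "不涉及", "不涉及", "不涉及", "", "", "", "", "", "", ""⟩
  pvRender st.tCase st.rCase st.tGc st.rGc st.tSmoke st.rSmoke st.tFirst st.rFirst
    st.tSecond st.rSecond st.tHg st.rHg st.tHgun st.rHgun

-- ===== PORT B =====
-- cells(stage): scan reversed(rows), first match = last occurrence; defaults when absent
def pvCellsB (rows : List (List (String × String))) (s : String) : String × String :=
  match rows.reverse.find? (pvIsStage s) with
  | some row => (pvCellTime row, pvCellRemark row)
  | none => ("不涉及", "")

def execute_plan_body_alt (rows : List (List (String × String))) : String :=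
  pvRender (pvCellsB rows "用例编写").1 (pvCellsB rows "用例编写").2
    (pvCellsB rows "跟测").1 (pvCellsB rows "跟测").2
    (pvCellsB rows "冒烟测试").1 (pvCellsB rows "冒烟测试").2
    (pvCellsB rows "第一轮系统测试").1 (pvCellsB rows "第一轮系统测试").2
    (pvCellsB rows "第二轮系统测试").1 (pvCellsB rows "第二轮系统测试").2
    (pvCellsB rows "回归测试").1 (pvCellsB rows "回归测试").2
    (pvCellsB rows "回滚验证").1 (pvCellsB rows "回滚验证").2

-- ===== PRECONDITION & SPEC =====
-- Pre_ excludes exactly the rows without a 'testStage' key, on which A raises KeyError.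
def Pre_execute_plan_body (rows : List (List (String × String))) : Prop :=
  rows.all (fun row => (PySem.Dict.mk row).contains "testStage") = true
instance (rows : List (List (String × String))) : Decidable (Pre_execute_plan_body rows) := by
  unfold Pre_execute_plan_body; infer_instance

def pvWitness_execute_plan_body : (List (List (String × String))) :=
  [[("testStage", "smoke"), ("time", "1d")], [("testStage", "regression")]]

def Spec_execute_plan_body (rows : List (List (String × String))) (out : String) : Prop := out = execute_plan_body_alt rows
instance (rows : List (List (String × String))) (out : String) : Decidable (Spec_execute_plan_body rows out) := by unfold Spec_execute_plan_body; infer_instance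

-- ===== CLAIM (what is proved, stated in full; the proofs are below) =====
def Claim_equal_execute_plan_body : Prop := ∀ (rows : List (List (String × String))), Dom_execute_plan_body rows → Pre_execute_plan_body rows → Spec_execute_plan_body rows (execute_plan_body rows)

-- ===== LEMMAS AND PROOFS =====

-- folding the 'last wins' update equals the first match of the reversed list
lemma pvFold_last (s : String) (cell : List (String × String) → String) :
    ∀ (rows : List (List (String × String))) (acc : String),
      rows.foldl (fun a row => if pvIsStage s row then cell row else a) acc =
        (match rows.reverse.find? (pvIsStage s) with
         | some row => cell row
         | none => acc) := by
  intro rows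
  induction rows with
  | nil => intro acc; simp
  | cons row rest ih =>
    intro acc
    simp only [List.foldl, List.reverse_cons, List.find?_append, ih]
    cases h : rest.reverse.find? (pvIsStage s) with
    | some x => simp
    | none =>
      cases hp : pvIsStage s row with
      | true => simp [List.find?, hp]
      | false => simp [List.find?, hp]

-- a field of A's fold satisfying the per-step equation is itself such a fold
lemma pvField (f : StA → String) (s : String) (cell : List (String × String) → String)
    (hf : ∀ st row, f (pvStepA st row) = if pvIsStage s row then cell row else f st) :
    ∀ (rows : List (List (String × String))) (st : StA),
      f (rows.foldl pvStepA st) =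
        rows.foldl (fun a row => if pvIsStage s row then cell row else a) (f st) := by
  intro rows
  induction rows with
  | nil => intro st; rfl
  | cons row rest ih => intro st; simp only [List.foldl, ih, hf]

-- a field of A's fold equals B's per-stage backward search
lemma pvField_cells (f : StA → String) (s : String) (cell : List (String × String) → String)
    (d : String)
    (hf : ∀ st row, f (pvStepA st row) = if pvIsStage s row then cell row else f st)
    (rows : List (List (String × String))) (st : StA) (hd : f st = d) :
    f (rows.foldl pvStepA st) =
      (match rows.reverse.find? (pvIsStage s) with
       | some row => cell row
       | none => d) := by
  rw [pvField f s cell hf, pvFold_last, hd]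

-- ===== VERDICT (by name: the statement is the Claim_ definition above) =====
theorem execute_plan_body_spec : Claim_equal_execute_plan_body := by
  intro rows _ _
  unfold Spec_execute_plan_body execute_plan_body execute_plan_body_alt
  dsimp only
  have hT : ∀ s (get : StA → String)
      (hf : ∀ st row, get (pvStepA st row) = if pvIsStage s row then pvCellTime row else get st)
      (hd : get (⟨"不涉及", "不涉及", "不涉及", "不涉及", "不涉及", "不涉及", "不涉及",
        "", "", "", "", "", "", ""⟩ : StA) = "不涉及"),
      get (rows.foldl pvStepA ⟨"不涉及", "不涉及", "不涉及", "不涉及", "不涉及", "不涉及", "不涉及",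
        "", "", "", "", "", "", ""⟩) = (pvCellsB rows s).1 := by
    intro s get hf hd
    rw [pvField_cells get s pvCellTime "不涉及" hf rows _ hd]
    unfold pvCellsB
    cases rows.reverse.find? (pvIsStage s) <;> rfl
  have hR : ∀ s (get : StA → String)
      (hf : ∀ st row, get (pvStepA st row) = if pvIsStage s row then pvCellRemark row else get st)
      (hd : get (⟨"不涉及", "不涉及", "不涉及", "不涉及", "不涉及", "不涉及", "不涉及",
        "", "", "", "", "", "", ""⟩ : StA) = ""),
      get (rows.foldl pvStepA ⟨"不涉及", "不涉及", "不涉及", "不涉及", "不涉及", "不涉及", "不涉及",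
        "", "", "", "", "", "", ""⟩) = (pvCellsB rows s).2 := by
    intro s get hf hd
    rw [pvField_cells get s pvCellRemark "" hf rows _ hd]
    unfold pvCellsB
    cases rows.reverse.find? (pvIsStage s) <;> rfl
  rw [hT "用例编写" StA.tCase (fun _ _ => rfl) rfl, hR "用例编写" StA.rCase (fun _ _ => rfl) rfl,
    hT "跟测" StA.tGc (fun _ _ => rfl) rfl, hR "跟测" StA.rGc (fun _ _ => rfl) rfl,
    hT "冒烟测试" StA.tSmoke (fun _ _ => rfl) rfl, hR "冒烟测试" StA.rSmoke (fun _ _ => rfl) rfl,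
    hT "第一轮系统测试" StA.tFirst (fun _ _ => rfl) rfl, hR "第一轮系统测试" StA.rFirst (fun _ _ => rfl) rfl,
    hT "第二轮系统测试" StA.tSecond (fun _ _ => rfl) rfl, hR "第二轮系统测试" StA.rSecond (fun _ _ => rfl) rfl,
    hT "回归测试" StA.tHg (fun _ _ => rfl) rfl, hR "回归测试" StA.rHg (fun _ _ => rfl) rfl,
    hT "回滚验证" StA.tHgun (fun _ _ => rfl) rfl, hR "回滚验证" StA.rHgun (fun _ _ => rfl) rfl]
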